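-- pv_equiv track=rewrite | github.com/KARAN2531/Python_Training | Logical_Problems/28_alphabet_index.py | alphabet_index
-- ===== SOURCE A (Python) =====
-- def alphabet_index(alphabet, name):
--     highest_index = -1
--     highest_letter = ''
--     for char in name.lower():
--         for i in range(len(alphabet)):
--             if char == alphabet[i] and i > highest_index:
--                 highest_index = i
--                 highest_letter = char
--     return f"{highest_index + 1}{highest_letter}"
--
-- alphabet = ["a", "b", "c", "d", "e", "f", "g", "h", "i", "j", "k", "l", "m",
--             "n", "o", "p", "q", "r", "s", "t", "u", "v", "w", "x", "y", "z"]
-- ===== SOURCE B (Python) =====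
-- def alphabet_index(alphabet, name):
--     letters = set(name.lower())
--     for i in range(len(alphabet) - 1, -1, -1):
--         if alphabet[i] in letters:
--             return f"{i + 1}{alphabet[i]}"
--     return "0"
-- ===== Notes on version B (the rewrite author's own statement) =====
-- stated objective: faster
-- what changed: B builds a set of the name's lowercased letters once and scans the alphabet from the top index downward with an early return, instead of A's per-character rescan of the whole alphabet while tracking a running maximum.
import Mathlib
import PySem

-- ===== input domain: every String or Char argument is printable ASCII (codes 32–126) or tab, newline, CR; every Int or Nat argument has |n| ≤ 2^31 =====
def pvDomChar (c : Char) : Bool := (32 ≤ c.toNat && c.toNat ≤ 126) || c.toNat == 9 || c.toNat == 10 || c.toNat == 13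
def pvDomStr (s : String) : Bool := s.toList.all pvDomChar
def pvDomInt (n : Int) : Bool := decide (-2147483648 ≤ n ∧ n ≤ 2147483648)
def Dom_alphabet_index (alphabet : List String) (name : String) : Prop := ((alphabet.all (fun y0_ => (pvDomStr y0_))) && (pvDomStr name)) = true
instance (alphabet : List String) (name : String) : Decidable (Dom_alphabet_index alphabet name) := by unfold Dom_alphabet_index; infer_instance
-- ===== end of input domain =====

-- B scans the alphabet once from the top with early exit over a set of name's letters,
-- instead of A's per-character rescan of the whole alphabet with a running maximum (objective: faster, measured).

-- ===== PORT A =====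
-- inner loop of A: 'for i in range(len(alphabet)): if char == alphabet[i] and i > highest_index: …'
def aInner (alphabet : List String) (c : Char) (st : Int × String) : Int × String :=
  (List.range alphabet.length).foldl
    (fun st i =>
      if String.mk [c] = alphabet.getD i "" ∧ (i : Int) > st.1 then ((i : Int), String.mk [c])
      else st) st

-- return f"{highest_index + 1}{highest_letter}"
def aOut (st : Int × String) : String := String.mk (PySem.Int.toChars (st.1 + 1) ++ st.2.toList)

def alphabet_index (alphabet : List String) (name : String) : String :=
  aOut (((PySem.Str.lower name).toList).foldl (fun st c => aInner alphabet c st) ((-1 : Int), ""))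

-- ===== PORT B =====
-- B's reverse loop: 'for i in range(len(alphabet)-1, -1, -1): if alphabet[i] in letters: return …'
def altGo (alphabet : List String) (letters : PySem.Set String) : Nat → String
  | 0 => "0"
  | n + 1 =>
      if alphabet.getD n "" ∈ letters then
        String.mk (PySem.Int.toChars ((n : Int) + 1) ++ (alphabet.getD n "").toList)
      else altGo alphabet letters n

def alphabet_index_alt (alphabet : List String) (name : String) : String :=
  altGo alphabet
    (PySem.Set.ofList (((PySem.Str.lower name).toList).map (fun c => String.mk [c])))
    alphabet.length

-- ===== PRECONDITION & SPEC =====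
def Spec_alphabet_index (alphabet : List String) (name : String) (out : String) : Prop := out = alphabet_index_alt alphabet name
instance (alphabet : List String) (name : String) (out : String) : Decidable (Spec_alphabet_index alphabet name out) := by unfold Spec_alphabet_index; infer_instance

-- ===== CLAIM (what is proved, stated in full; the proofs are below) =====
def Claim_equal_alphabet_index : Prop := ∀ (alphabet : List String) (name : String), Dom_alphabet_index alphabet name → Spec_alphabet_index alphabet name (alphabet_index alphabet name)

-- ===== LEMMAS AND PROOFS =====

-- greatest i < n with alphabet[i] = the one-char string of c, else -1
def mAux (alphabet : List String) (c : Char) : Nat → Int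
  | 0 => -1
  | n + 1 => if String.mk [c] = alphabet.getD n "" then (n : Int) else mAux alphabet c n

-- greatest i < n with alphabet[i] among the one-char strings of cs, else -1
def bestIdx (alphabet : List String) (cs : List Char) : Nat → Int
  | 0 => -1
  | n + 1 =>
      if alphabet.getD n "" ∈ cs.map (fun c => String.mk [c]) then (n : Int)
      else bestIdx alphabet cs n

-- max over c ∈ cs of mAux alphabet c alphabet.length
def bestOf (alphabet : List String) : List Char → Int
  | [] => -1
  | c :: rest => max (mAux alphabet c alphabet.length) (bestOf alphabet rest)

theorem mAux_bounds (A : List String) (c : Char) (n : Nat) :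
    -1 ≤ mAux A c n ∧ mAux A c n < (n : Int) := by
  induction n with
  | zero => simp [mAux]
  | succ n ih => simp only [mAux]; split_ifs <;> omega

theorem mAux_eq_or (A : List String) (c : Char) (n : Nat) :
    mAux A c n = -1 ∨ ∃ k : Nat, mAux A c n = (k : Int) ∧ k < n ∧ String.mk [c] = A.getD k "" := by
  induction n with
  | zero => simp [mAux]
  | succ n ih =>
    simp only [mAux]
    split_ifs with h
    · right; exact ⟨n, rfl, by omega, h⟩
    · rcases ih with h1 | ⟨k, hk, hkn, hm⟩
      · left; exact h1
      · right; exact ⟨k, hk, by omega, hm⟩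

theorem mAux_max (A : List String) (c : Char) (n : Nat) :
    ∀ i : Nat, i < n → String.mk [c] = A.getD i "" → (i : Int) ≤ mAux A c n := by
  induction n with
  | zero => intro i h; omega
  | succ n ih =>
    intro i hi hm
    simp only [mAux]
    split_ifs with h
    · omega
    · have : i ≠ n := by rintro rfl; exact h hm
      exact ih i (by omega) hm

theorem innerFold (A : List String) (c : Char) (n : Nat) :
    ∀ st : Int × String, -1 ≤ st.1 →
      (List.range n).foldl
        (fun st i =>
          if String.mk [c] = A.getD i "" ∧ (i : Int) > st.1 then ((i : Int), String.mk [c])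
          else st) st
      = if mAux A c n > st.1 then (mAux A c n, String.mk [c]) else st := by
  induction n with
  | zero =>
    intro st h
    simp only [List.range_zero, List.foldl_nil, mAux]
    rw [if_neg (by omega)]
  | succ n ih =>
    intro st h
    rw [List.range_succ, List.foldl_append, List.foldl_cons, List.foldl_nil, ih st h]
    have hb := mAux_bounds A c n
    simp only [mAux]
    by_cases hm : String.mk [c] = A.getD n ""
    · by_cases h1 : mAux A c n > st.1
      · simp only [if_pos h1]
        rw [if_pos ⟨hm, by omega⟩, if_pos hm, if_pos (by omega)]
      · simp only [if_neg h1]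
        by_cases h2 : (n : Int) > st.1
        · rw [if_pos ⟨hm, h2⟩, if_pos hm, if_pos h2]
        · rw [if_neg (by tauto), if_pos hm, if_neg h2]
    · by_cases h1 : mAux A c n > st.1
      · simp only [if_pos h1]
        rw [if_neg (by tauto), if_neg hm, if_pos h1]
      · simp only [if_neg h1]
        rw [if_neg (by tauto), if_neg hm, if_neg h1]

theorem bestOf_ge (A : List String) (cs : List Char) : -1 ≤ bestOf A cs := by
  induction cs with
  | nil => simp [bestOf]
  | cons c rest ih => have := mAux_bounds A c A.length; simp only [bestOf]; omega

theorem mAux_le_bestOf (A : List String) (cs : List Char) (c : Char) (hc : c ∈ cs) :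
    mAux A c A.length ≤ bestOf A cs := by
  induction cs with
  | nil => cases hc
  | cons d rest ih =>
    rcases List.mem_cons.mp hc with rfl | h
    · simp only [bestOf]; omega
    · have := ih h; simp only [bestOf]; omega

theorem bestOf_spec1 (A : List String) (cs : List Char) :
    bestOf A cs = -1 ∨ ∃ k : Nat, bestOf A cs = (k : Int) ∧ k < A.length ∧
      A.getD k "" ∈ cs.map (fun c => String.mk [c]) := by
  induction cs with
  | nil => left; rfl
  | cons c rest ih =>
    simp only [bestOf]
    rcases le_or_gt (bestOf A rest) (mAux A c A.length) with h | h
    · rw [max_eq_left h]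
      rcases mAux_eq_or A c A.length with h1 | ⟨k, hk, hkn, hm⟩
      · left; exact h1
      · right; refine ⟨k, hk, hkn, ?_⟩
        simp only [List.map_cons, List.mem_cons]; left; exact hm.symm
    · rw [max_eq_right (le_of_lt h)]
      rcases ih with h1 | ⟨k, hk, hkn, hm⟩
      · left; exact h1
      · right; refine ⟨k, hk, hkn, ?_⟩
        simp only [List.map_cons, List.mem_cons]; right; exact hm

theorem bestOf_spec2 (A : List String) (cs : List Char) :
    ∀ k : Nat, k < A.length → A.getD k "" ∈ cs.map (fun c => String.mk [c]) →
      (k : Int) ≤ bestOf A cs := by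
  intro k hk hm
  rcases List.mem_map.mp hm with ⟨c, hc, he⟩
  calc (k : Int) ≤ mAux A c A.length := mAux_max A c A.length k hk he
    _ ≤ bestOf A cs := mAux_le_bestOf A cs c hc

theorem bestIdx_spec1 (A : List String) (cs : List Char) (n : Nat) :
    bestIdx A cs n = -1 ∨ ∃ k : Nat, bestIdx A cs n = (k : Int) ∧ k < n ∧
      A.getD k "" ∈ cs.map (fun c => String.mk [c]) := by
  induction n with
  | zero => left; rfl
  | succ n ih =>
    simp only [bestIdx]
    split_ifs with h
    · right; exact ⟨n, rfl, by omega, h⟩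
    · rcases ih with h1 | ⟨k, hk, hkn, hm⟩
      · left; exact h1
      · right; exact ⟨k, hk, by omega, hm⟩

theorem bestIdx_spec2 (A : List String) (cs : List Char) (n : Nat) :
    ∀ k : Nat, k < n → A.getD k "" ∈ cs.map (fun c => String.mk [c]) →
      (k : Int) ≤ bestIdx A cs n := by
  induction n with
  | zero => intro k h; omega
  | succ n ih =>
    intro k hk hm
    simp only [bestIdx]
    split_ifs with h
    · omega
    · have : k ≠ n := by rintro rfl; exact h hm
      exact ih k (by omega) hm

theorem bestOf_eq_bestIdx (A : List String) (cs : List Char) :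
    bestOf A cs = bestIdx A cs A.length := by
  have h1 := bestOf_spec1 A cs
  have h2 := bestOf_spec2 A cs
  have h3 := bestIdx_spec1 A cs A.length
  have h4 := bestIdx_spec2 A cs A.length
  rcases h1 with e1 | ⟨k, hk, hkn, hm⟩
  · rcases h3 with e3 | ⟨k, hk, hkn, hm⟩
    · omega
    · have := h2 k hkn hm; omega
  · have := h4 k hkn hm
    rcases h3 with e3 | ⟨j, hj, hjn, hjm⟩
    · omega
    · have := h2 j hjn hjm; omega

theorem outerFold (A : List String) (cs : List Char) :
    ∀ st : Int × String, -1 ≤ st.1 →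
      (cs.foldl (fun st c => aInner A c st) st).1 = max st.1 (bestOf A cs) ∧
      (cs.foldl (fun st c => aInner A c st) st).2 =
        (if (cs.foldl (fun st c => aInner A c st) st).1 = st.1 then st.2
         else A.getD (cs.foldl (fun st c => aInner A c st) st).1.toNat "") := by
  induction cs with
  | nil =>
    intro st h
    simp only [List.foldl_nil, bestOf]
    exact ⟨by omega, by simp⟩
  | cons c rest ih =>
    intro st h
    have hbm := mAux_bounds A c A.length
    have hstep : aInner A c st =
        if mAux A c A.length > st.1 then (mAux A c A.length, String.mk [c]) else st :=
      innerFold A c A.length st h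
    simp only [List.foldl_cons, bestOf]
    by_cases hu : mAux A c A.length > st.1
    · rw [hstep, if_pos hu]
      obtain ⟨r1, r2⟩ := ih (mAux A c A.length, String.mk [c]) (by omega)
      have hge := bestOf_ge A rest
      refine ⟨by rw [r1]; simp only; omega, ?_⟩
      rw [r2]
      have hr1 := r1
      by_cases he : (rest.foldl (fun st c => aInner A c st) (mAux A c A.length, String.mk [c])).1
          = mAux A c A.length
      · rw [if_pos he, if_neg (by omega), he]
        rcases mAux_eq_or A c A.length with h1 | ⟨k, hk, hkn, hm⟩
        · omega
        · rw [hk]; simp [hm]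
      · rw [if_neg he, if_neg (by simp only at hr1; omega)]
    · rw [hstep, if_neg hu]
      obtain ⟨r1, r2⟩ := ih st h
      refine ⟨by rw [r1]; omega, r2⟩

theorem altGo_eq (A : List String) (cs : List Char) (n : Nat) :
    altGo A (PySem.Set.ofList (cs.map (fun c => String.mk [c]))) n =
      (if bestIdx A cs n = -1 then "0"
       else String.mk (PySem.Int.toChars (bestIdx A cs n + 1) ++
              (A.getD (bestIdx A cs n).toNat "").toList)) := by
  induction n with
  | zero => rfl
  | succ n ih =>
    simp only [altGo, bestIdx, PySem.Set.mem_ofList]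
    by_cases h : A.getD n "" ∈ cs.map (fun c => String.mk [c])
    · rw [if_pos h, if_pos h, if_neg (by omega)]
      simp
    · rw [if_neg h, if_neg h, ih]

-- ===== VERDICT (by name: the statement is the Claim_ definition above) =====
theorem alphabet_index_spec : Claim_equal_alphabet_index := by
  intro alphabet name _
  unfold Spec_alphabet_index alphabet_index alphabet_index_alt
  set cs := (PySem.Str.lower name).toList with hcs
  obtain ⟨r1, r2⟩ := outerFold alphabet cs ((-1 : Int), "") (by norm_num)
  rw [altGo_eq alphabet cs alphabet.length, ← bestOf_eq_bestIdx]
  have hge := bestOf_ge alphabet cs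
  simp only at r1 r2
  by_cases h : bestOf alphabet cs = -1
  · rw [if_pos h]
    have e1 : (cs.foldl (fun st c => aInner alphabet c st) ((-1 : Int), "")).1 = -1 := by
      rw [r1, h]; omega
    have epair : cs.foldl (fun st c => aInner alphabet c st) ((-1 : Int), "") = ((-1 : Int), "") := by
      refine Prod.ext e1 ?_
      rw [r2, if_pos e1]
    rw [epair]
    decide
  · rw [if_neg h]
    have e1 : (cs.foldl (fun st c => aInner alphabet c st) ((-1 : Int), "")).1 = bestOf alphabet cs := by
      rw [r1]; omega
    have epair : cs.foldl (fun st c => aInner alphabet c st) ((-1 : Int), "") =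
        (bestOf alphabet cs, alphabet.getD (bestOf alphabet cs).toNat "") := by
      refine Prod.ext e1 ?_
      rw [r2, if_neg (by omega), e1]
    rw [epair]
    rfl
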